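-- pv_equiv track=rewrite | github.com/macho715/sct_invoice | HVDC_Invoice_Audit/Archive/02_DSV_DOMESTIC_Legacy_20251013/Reference_Data/domestic ref/validate_with_reference.py | region_of
-- ===== SOURCE A (Python) =====
-- def region_of(s):
--     p = str(s).upper()
--     if any(k in p for k in ["MUSSAFAH", "ICAD", "MARKAZ", "M44", "PRESTIGE"]):
--         return "MUSSAFAH"
--     if any(k in p for k in ["MINA", "FREEPORT", "ZAYED", "JDN", "PORT"]):
--         return "MINA"
--     if "MIRFA" in p or "PMO" in p:
--         return "MIRFA"
--     if any(k in p for k in ["SHUWEIHAT", "S2", "S3", "POWER"]):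
--         return "SHUWEIHAT"
--     return "OTHER"
-- ===== SOURCE B (Python) =====
-- # Single left-to-right scan of the text: at each position, check which ranked
-- # keywords start there and keep the minimal (best-priority) rank seen.
-- _RANKED = [
--     ("MUSSAFAH", 0), ("ICAD", 0), ("MARKAZ", 0), ("M44", 0), ("PRESTIGE", 0),
--     ("MINA", 1), ("FREEPORT", 1), ("ZAYED", 1), ("JDN", 1), ("PORT", 1),
--     ("MIRFA", 2), ("PMO", 2),
--     ("SHUWEIHAT", 3), ("S2", 3), ("S3", 3), ("POWER", 3),
-- ]
-- _NAMES = ["MUSSAFAH", "MINA", "MIRFA", "SHUWEIHAT", "OTHER"]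
--
-- def region_of(s):
--     p = str(s).upper()
--     best = 4
--     for i in range(len(p)):
--         for kw, rank in _RANKED:
--             if rank < best and p.startswith(kw, i):
--                 best = rank
--     return _NAMES[best]
-- ===== Notes on version B (the rewrite author's own statement) =====
-- stated objective: alternative
-- what changed: Instead of testing keyword groups with substring membership, B scans the text once position by position, checks which ranked keywords start at each offset, and keeps the minimal rank; the best rank indexes a name table.
import Mathlib
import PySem

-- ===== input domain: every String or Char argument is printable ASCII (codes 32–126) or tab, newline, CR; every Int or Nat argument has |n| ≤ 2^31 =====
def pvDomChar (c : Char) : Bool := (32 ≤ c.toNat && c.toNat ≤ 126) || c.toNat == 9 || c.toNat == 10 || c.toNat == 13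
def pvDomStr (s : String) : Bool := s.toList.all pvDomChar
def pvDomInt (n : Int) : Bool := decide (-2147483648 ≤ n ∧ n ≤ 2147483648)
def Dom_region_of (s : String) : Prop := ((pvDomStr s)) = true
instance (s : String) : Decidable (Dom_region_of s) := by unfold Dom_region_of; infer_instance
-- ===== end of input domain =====

-- B replaces A's staged keyword-group membership tests by a single positional scan of the
-- uppercased text that keeps the minimal matching rank (alternative algorithm, same cost).


-- ===== PORT A =====
def region_of (s : String) : String :=
  let p := PySem.Str.upper s
  if (["MUSSAFAH", "ICAD", "MARKAZ", "M44", "PRESTIGE"].any (fun k => PySem.Str.isIn k p)) then "MUSSAFAH"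
  else if (["MINA", "FREEPORT", "ZAYED", "JDN", "PORT"].any (fun k => PySem.Str.isIn k p)) then "MINA"
  else if (PySem.Str.isIn "MIRFA" p || PySem.Str.isIn "PMO" p) then "MIRFA"
  else if (["SHUWEIHAT", "S2", "S3", "POWER"].any (fun k => PySem.Str.isIn k p)) then "SHUWEIHAT"
  else "OTHER"

-- ===== PORT B =====
def pvRanked : List (List Char × Nat) :=
  [("MUSSAFAH".toList, 0), ("ICAD".toList, 0), ("MARKAZ".toList, 0), ("M44".toList, 0), ("PRESTIGE".toList, 0),
   ("MINA".toList, 1), ("FREEPORT".toList, 1), ("ZAYED".toList, 1), ("JDN".toList, 1), ("PORT".toList, 1),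
   ("MIRFA".toList, 2), ("PMO".toList, 2),
   ("SHUWEIHAT".toList, 3), ("S2".toList, 3), ("S3".toList, 3), ("POWER".toList, 3)]

def pvNames : List String := ["MUSSAFAH", "MINA", "MIRFA", "SHUWEIHAT", "OTHER"]

-- p.startswith(kw, i) with 0 ≤ i is ported exactly as a prefix test on (chars drop i).
def region_of_alt (s : String) : String :=
  let cs := (PySem.Str.upper s).toList
  let best := (List.range cs.length).foldl (fun best i =>
      pvRanked.foldl (fun best kr =>
        if kr.2 < best ∧ kr.1.isPrefixOf (cs.drop i) then kr.2 else best) best) 4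
  pvNames.getD best "OTHER"

-- ===== PRECONDITION & SPEC =====
def Spec_region_of (s : String) (out : String) : Prop := out = region_of_alt s
instance (s : String) (out : String) : Decidable (Spec_region_of s out) := by unfold Spec_region_of; infer_instance

-- ===== CLAIM (what is proved, stated in full; the proofs are below) =====
def Claim_equal_region_of : Prop := ∀ (s : String), Dom_region_of s → Spec_region_of s (region_of s)

-- ===== LEMMAS AND PROOFS =====

set_option maxHeartbeats 1000000

-- the step function of B's scan, on flattened (position, (keyword, rank)) triples
def pvStep (cs : List Char) (acc : Nat) (x : Nat × (List Char × Nat)) : Nat :=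
  if x.2.2 < acc ∧ x.2.1.isPrefixOf (cs.drop x.1) then x.2.2 else acc

lemma pvFoldMin (cs : List Char) :
    ∀ (L : List (Nat × (List Char × Nat))) (b : Nat),
      (L.foldl (pvStep cs) b ≤ b) ∧
      (L.foldl (pvStep cs) b = b ∨ ∃ x ∈ L, (x.2.2 < b ∧ x.2.1.isPrefixOf (cs.drop x.1) = true) ∧ L.foldl (pvStep cs) b = x.2.2) ∧
      (∀ x ∈ L, x.2.1.isPrefixOf (cs.drop x.1) = true → L.foldl (pvStep cs) b ≤ x.2.2) := by
  intro L
  induction L with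
  | nil => intro b; simp
  | cons hd tl ih =>
    intro b
    obtain ⟨h1, h2, h3⟩ := ih (pvStep cs b hd)
    have hstep : pvStep cs b hd ≤ b := by unfold pvStep; split <;> omega
    refine ⟨le_trans h1 hstep, ?_, ?_⟩
    · rcases h2 with h2 | ⟨x, hx, hc, he⟩
      · by_cases hp : hd.2.2 < b ∧ hd.2.1.isPrefixOf (cs.drop hd.1) = true
        · refine Or.inr ⟨hd, by simp, hp, ?_⟩
          simp only [List.foldl_cons, h2]
          unfold pvStep; simp [hp.1, hp.2]
        · refine Or.inl ?_
          simp only [List.foldl_cons, h2]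
          unfold pvStep; split
          · exact absurd (by assumption) hp
          · rfl
      · refine Or.inr ⟨x, by simp [hx], ⟨lt_of_lt_of_le hc.1 hstep, hc.2⟩, he⟩
    · intro x hx hpx
      rcases List.mem_cons.mp hx with h | hx
      · subst h
        refine le_trans h1 ?_
        unfold pvStep
        split_ifs with hcond
        · exact le_rfl
        · simp only [hpx, and_true] at hcond
          omega
      · exact h3 x hx hpx

-- matching anywhere in range(len) ↔ Python substring membership, for nonempty keywords
lemma pvMatchIff (cs kw : List Char) (hne : kw ≠ []) :
    (∃ i ∈ List.range cs.length, kw.isPrefixOf (cs.drop i) = true) ↔ PySem.Chars.isIn kw cs = true := by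
  rw [← PySem.Chars.exists_prefix_drop_iff_isIn]
  constructor
  · rintro ⟨i, _, hp⟩
    exact ⟨i, List.isPrefixOf_iff_prefix.mp hp⟩
  · rintro ⟨j, hp⟩
    by_cases hj : j < cs.length
    · exact ⟨j, List.mem_range.mpr hj, List.isPrefixOf_iff_prefix.mpr hp⟩
    · exfalso
      have : cs.drop j = [] := List.drop_eq_nil_of_le (le_of_not_gt hj)
      rw [this] at hp
      exact hne (List.prefix_nil.mp hp)

-- flatten B's double fold into one fold over (position, entry) triples
lemma pvAltEq (s : String) : region_of_alt s =
    pvNames.getD (((List.range (PySem.Str.upper s).toList.length).flatMap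
      (fun i => pvRanked.map (fun kr => (i, kr)))).foldl (pvStep (PySem.Str.upper s).toList) 4) "OTHER" := by
  unfold region_of_alt
  simp only [List.foldl_flatMap, List.foldl_map]
  rfl

-- each table entry is a nonempty keyword drawn from exactly one of A's four groups
lemma pvGrp : ∀ kr ∈ pvRanked, ∃ k : String, k.toList = kr.1 ∧ k.toList ≠ [] ∧
    ((kr.2 = 0 ∧ k ∈ ["MUSSAFAH", "ICAD", "MARKAZ", "M44", "PRESTIGE"]) ∨
     (kr.2 = 1 ∧ k ∈ ["MINA", "FREEPORT", "ZAYED", "JDN", "PORT"]) ∨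
     (kr.2 = 2 ∧ (k = "MIRFA" ∨ k = "PMO")) ∨
     (kr.2 = 3 ∧ k ∈ ["SHUWEIHAT", "S2", "S3", "POWER"])) := by
  intro kr hkr
  simp only [pvRanked, List.mem_cons, List.not_mem_nil, or_false] at hkr
  rcases hkr with h|h|h|h|h|h|h|h|h|h|h|h|h|h|h|h <;> subst h
  · exact ⟨"MUSSAFAH", rfl, by decide, by simp⟩
  · exact ⟨"ICAD", rfl, by decide, by simp⟩
  · exact ⟨"MARKAZ", rfl, by decide, by simp⟩
  · exact ⟨"M44", rfl, by decide, by simp⟩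
  · exact ⟨"PRESTIGE", rfl, by decide, by simp⟩
  · exact ⟨"MINA", rfl, by decide, by simp⟩
  · exact ⟨"FREEPORT", rfl, by decide, by simp⟩
  · exact ⟨"ZAYED", rfl, by decide, by simp⟩
  · exact ⟨"JDN", rfl, by decide, by simp⟩
  · exact ⟨"PORT", rfl, by decide, by simp⟩
  · exact ⟨"MIRFA", rfl, by decide, by simp⟩
  · exact ⟨"PMO", rfl, by decide, by simp⟩
  · exact ⟨"SHUWEIHAT", rfl, by decide, by simp⟩
  · exact ⟨"S2", rfl, by decide, by simp⟩
  · exact ⟨"S3", rfl, by decide, by simp⟩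
  · exact ⟨"POWER", rfl, by decide, by simp⟩

-- ===== VERDICT (by name: the statement is the Claim_ definition above) =====
theorem region_of_spec : Claim_equal_region_of := by
  intro s _
  unfold Spec_region_of
  rw [pvAltEq]
  simp only [region_of]
  set cs := (PySem.Str.upper s).toList with hcs
  set L := (List.range cs.length).flatMap (fun i => pvRanked.map (fun kr => (i, kr))) with hL
  obtain ⟨-, hmem, hmin⟩ := pvFoldMin cs L 4
  set r := L.foldl (pvStep cs) 4 with hr
  have hmemL : ∀ (i : Nat) (kr : List Char × Nat), (i, kr) ∈ L ↔ i ∈ List.range cs.length ∧ kr ∈ pvRanked := by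
    intro i kr
    simp [hL, List.mem_flatMap]
  have hisin : ∀ k : String, PySem.Str.isIn k (PySem.Str.upper s) = PySem.Chars.isIn k.toList cs := by
    intro k; rw [PySem.Str.isIn_eq, hcs]
  -- if a table entry's keyword occurs in cs, then r ≤ its rank
  have hub : ∀ kr ∈ pvRanked, PySem.Chars.isIn kr.1 cs = true → r ≤ kr.2 := by
    intro kr hkr hin
    obtain ⟨k, hk, hne, -⟩ := pvGrp kr hkr
    obtain ⟨i, hi, hpref⟩ := (pvMatchIff cs kr.1 (hk ▸ hne)).mpr hin
    exact hmin (i, kr) ((hmemL i kr).mpr ⟨hi, hkr⟩) hpref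
  -- conversely: r = 4, or r is the rank of some table keyword occurring in cs
  have hcases : r = 4 ∨ ∃ kr ∈ pvRanked, PySem.Chars.isIn kr.1 cs = true ∧ r = kr.2 := by
    rcases hmem with h | ⟨x, hx, ⟨-, hpref⟩, he⟩
    · exact Or.inl h
    · obtain ⟨hi, hkr⟩ := (hmemL x.1 x.2).mp (by exact hx)
      obtain ⟨k, hk, hne, -⟩ := pvGrp x.2 hkr
      exact Or.inr ⟨x.2, hkr, (pvMatchIff cs x.2.1 (hk ▸ hne)).mp ⟨x.1, hi, hpref⟩, he⟩
  clear hmem hmin hr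
  split_ifs with h1 h2 h3 h4
  · -- some rank-0 keyword matches: r = 0
    simp only [List.any_eq_true, hisin] at h1
    obtain ⟨k, hk, hkin⟩ := h1
    simp only [List.mem_cons, List.not_mem_nil, or_false] at hk
    have hle0 : r ≤ 0 := by
      rcases hk with rfl|rfl|rfl|rfl|rfl
      · exact hub ("MUSSAFAH".toList, 0) (by decide) hkin
      · exact hub ("ICAD".toList, 0) (by decide) hkin
      · exact hub ("MARKAZ".toList, 0) (by decide) hkin
      · exact hub ("M44".toList, 0) (by decide) hkin
      · exact hub ("PRESTIGE".toList, 0) (by decide) hkin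
    have h0 : r = 0 := by omega
    simp [h0, pvNames]
  · simp only [List.any_eq_true, hisin] at h1 h2
    push_neg at h1
    obtain ⟨k, hk, hkin⟩ := h2
    simp only [List.mem_cons, List.not_mem_nil, or_false] at hk
    have hle1 : r ≤ 1 := by
      rcases hk with rfl|rfl|rfl|rfl|rfl
      · exact hub ("MINA".toList, 1) (by decide) hkin
      · exact hub ("FREEPORT".toList, 1) (by decide) hkin
      · exact hub ("ZAYED".toList, 1) (by decide) hkin
      · exact hub ("JDN".toList, 1) (by decide) hkin
      · exact hub ("PORT".toList, 1) (by decide) hkin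
    have hr1 : r = 1 := by
      rcases hcases with h | ⟨kr, hkr, hin, he⟩
      · omega
      · obtain ⟨k', hk', -, hg⟩ := pvGrp kr hkr
        rcases hg with ⟨hz, hmem0⟩ | hg | hg | hg
        · exact absurd (hk' ▸ hin) (h1 k' hmem0)
        all_goals omega
    simp [hr1, pvNames]
  · simp only [List.any_eq_true, Bool.or_eq_true, hisin] at h1 h2 h3
    push_neg at h1 h2
    have hle2 : r ≤ 2 := by
      rcases h3 with h | h
      · exact hub ("MIRFA".toList, 2) (by decide) h
      · exact hub ("PMO".toList, 2) (by decide) h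
    have hr2 : r = 2 := by
      rcases hcases with h | ⟨kr, hkr, hin, he⟩
      · omega
      · obtain ⟨k', hk', -, hg⟩ := pvGrp kr hkr
        rcases hg with ⟨hz, hmem0⟩ | ⟨hz, hmem1⟩ | hg | hg
        · exact absurd (hk' ▸ hin) (h1 k' hmem0)
        · exact absurd (hk' ▸ hin) (h2 k' hmem1)
        all_goals omega
    simp [hr2, pvNames]
  · simp only [List.any_eq_true, Bool.or_eq_true, hisin] at h1 h2 h3 h4
    push_neg at h1 h2 h3
    obtain ⟨k, hk, hkin⟩ := h4
    simp only [List.mem_cons, List.not_mem_nil, or_false] at hk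
    have hle3 : r ≤ 3 := by
      rcases hk with rfl|rfl|rfl|rfl
      · exact hub ("SHUWEIHAT".toList, 3) (by decide) hkin
      · exact hub ("S2".toList, 3) (by decide) hkin
      · exact hub ("S3".toList, 3) (by decide) hkin
      · exact hub ("POWER".toList, 3) (by decide) hkin
    have hr3 : r = 3 := by
      rcases hcases with h | ⟨kr, hkr, hin, he⟩
      · omega
      · obtain ⟨k', hk', -, hg⟩ := pvGrp kr hkr
        rcases hg with ⟨hz, hmem0⟩ | ⟨hz, hmem1⟩ | ⟨hz, hmem2⟩ | hg
        · exact absurd (hk' ▸ hin) (h1 k' hmem0)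
        · exact absurd (hk' ▸ hin) (h2 k' hmem1)
        · rcases hmem2 with rfl | rfl
          · exact absurd (hk' ▸ hin) h3.1
          · exact absurd (hk' ▸ hin) h3.2
        · omega
    simp [hr3, pvNames]
  · simp only [List.any_eq_true, Bool.or_eq_true, hisin] at h1 h2 h3 h4
    push_neg at h1 h2 h3 h4
    have hr4 : r = 4 := by
      rcases hcases with h | ⟨kr, hkr, hin, he⟩
      · exact h
      · exfalso
        obtain ⟨k', hk', -, hg⟩ := pvGrp kr hkr
        rcases hg with ⟨hz, hmem0⟩ | ⟨hz, hmem1⟩ | ⟨hz, hmem2⟩ | ⟨hz, hmem3⟩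
        · exact absurd (hk' ▸ hin) (h1 k' hmem0)
        · exact absurd (hk' ▸ hin) (h2 k' hmem1)
        · rcases hmem2 with rfl | rfl
          · exact absurd (hk' ▸ hin) h3.1
          · exact absurd (hk' ▸ hin) h3.2
        · exact absurd (hk' ▸ hin) (h4 k' hmem3)
    simp [hr4, pvNames]
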